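-- pv_equiv track=rewrite | github.com/Dinnerb0ne2/pvim | src/ui/editor/text_objects.py | word_range
-- ===== SOURCE A (Python) =====
-- def is_word_char(char: str) -> bool:
--     return char.isalnum() or char == "_"
--
-- def word_range(line: str, cursor_col: int, scope: str) -> tuple[int, int] | None:
--     if not line:
--         return None
--     if cursor_col >= len(line):
--         index = len(line) - 1
--     else:
--         index = cursor_col
--     if index < 0:
--         return None
--     if not is_word_char(line[index]) and index > 0 and is_word_char(line[index - 1]):
--         index -= 1
--     if not is_word_char(line[index]):
--         right = index
--         while right < len(line) and not is_word_char(line[right]):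
--             right += 1
--         if right >= len(line):
--             return None
--         index = right
--
--     start = index
--     end = index
--     while start > 0 and is_word_char(line[start - 1]):
--         start -= 1
--     while end < len(line) and is_word_char(line[end]):
--         end += 1
--
--     if scope == "a":
--         while start > 0 and line[start - 1].isspace():
--             start -= 1
--         while end < len(line) and line[end].isspace():
--             end += 1
--     return start, end
-- ===== SOURCE B (Python) =====
-- def _kind(ch: str) -> int:
--     # 0 = word char (alnum or '_'), 1 = whitespace, 2 = other
--     if ch.isalnum() or ch == "_":
--         return 0
--     return 1 if ch.isspace() else 2
--
-- def word_range(line: str, cursor_col: int, scope: str) -> tuple[int, int] | None: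
--     n = len(line)
--     if n == 0 or cursor_col < 0:
--         return None
--     idx = min(cursor_col, n - 1)
--     # one pass: tokenize the line into maximal runs (kind, start, end)
--     runs = []
--     i = 0
--     while i < n:
--         k = _kind(line[i])
--         j = i + 1
--         while j < n and _kind(line[j]) == k:
--             j += 1
--         runs.append((k, i, j))
--         i = j
--     # walk to the run covering idx, remembering the two previous runs
--     prev2 = prev = None
--     rest = runs
--     while rest and rest[0][2] <= idx:
--         prev2, prev, rest = prev, rest[0], rest[1:]
--     cur = rest[0]
--     if cur[0] == 0:
--         target, left, right = cur, prev, rest[1:]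
--     elif cur[1] == idx and prev is not None and prev[0] == 0:
--         target, left, right = prev, prev2, rest
--     else:
--         prev, rest = cur, rest[1:]
--         while rest and rest[0][0] != 0:
--             prev, rest = rest[0], rest[1:]
--         if not rest:
--             return None
--         target, left, right = rest[0], prev, rest[1:]
--     s, e = target[1], target[2]
--     if scope == "a":
--         if left is not None and left[0] == 1:
--             s = left[1]
--         if right and right[0][0] == 1:
--             e = right[0][2]
--     return (s, e)
-- ===== Notes on version B (the rewrite author's own statement) =====
-- stated objective: alternative
-- what changed: B tokenizes the line once into maximal (kind,start,end) runs of word/space/other characters and selects the target word run (with its neighbours for the 'a' whitespace absorption) by a single walk over the run list, instead of A's five separate character-index while-loops around the cursor.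
import Mathlib
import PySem

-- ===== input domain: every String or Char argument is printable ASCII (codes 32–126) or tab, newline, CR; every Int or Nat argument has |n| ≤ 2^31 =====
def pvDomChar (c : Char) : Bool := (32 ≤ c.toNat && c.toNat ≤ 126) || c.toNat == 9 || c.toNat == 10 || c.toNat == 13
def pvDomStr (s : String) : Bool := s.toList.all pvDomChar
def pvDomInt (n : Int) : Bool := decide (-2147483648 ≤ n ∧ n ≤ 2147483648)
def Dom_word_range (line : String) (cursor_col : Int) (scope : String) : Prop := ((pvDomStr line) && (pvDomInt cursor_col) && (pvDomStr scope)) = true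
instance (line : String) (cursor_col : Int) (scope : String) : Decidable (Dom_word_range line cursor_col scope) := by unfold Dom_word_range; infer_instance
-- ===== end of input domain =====

-- B tokenizes the line once into maximal (kind,start,end) runs and selects the target word
-- run (and its neighbours, for the 'a' whitespace absorption) by one walk over the run list,
-- instead of A's five character-index while-loops around the cursor (objective: alternative).

-- ===== PORT A =====
def isWordChar (c : Char) : Bool := PySem.Chars.isalnum c || c == '_'

-- while r < len(line) and p(line[r]): r += 1
def pvScan (p : Char → Bool) (cs : List Char) (r : Nat) : Nat :=
  if h : r < cs.length ∧ p (cs.getD r ' ') = true then pvScan p cs (r + 1) else r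
termination_by cs.length - r
decreasing_by omega

-- while s > 0 and p(line[s-1]): s -= 1
def pvScanBack (p : Char → Bool) (cs : List Char) (s : Nat) : Nat :=
  if h : 0 < s ∧ p (cs.getD (s - 1) ' ') = true then pvScanBack p cs (s - 1) else s
termination_by s
decreasing_by omega

-- all indices below are in range when read, so `getD` is exact for Python's line[i]
def word_range (line : String) (cursor_col : Int) (scope : String) : Option (Int × Int) :=
  let cs := line.toList
  if cs.length = 0 then none else
  let index : Int := if cursor_col ≥ (cs.length : Int) then (cs.length : Int) - 1 else cursor_col
  if index < 0 then none else
  let i0 : Nat := index.toNat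
  let i1 : Nat :=
    if !isWordChar (cs.getD i0 ' ') && decide (0 < i0) && isWordChar (cs.getD (i0 - 1) ' ')
    then i0 - 1 else i0
  let oi : Option Nat :=
    if !isWordChar (cs.getD i1 ' ') then
      let right := pvScan (fun c => !isWordChar c) cs i1
      if cs.length ≤ right then none else some right
    else some i1
  match oi with
  | none => none
  | some i2 =>
    let start := pvScanBack isWordChar cs i2
    let e := pvScan isWordChar cs i2
    if scope == "a" then
      let start := pvScanBack (fun c => PySem.Chars.isspace c) cs start
      let e := pvScan (fun c => PySem.Chars.isspace c) cs e
      some ((start : Int), (e : Int))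
    else
      some ((start : Int), (e : Int))

-- ===== PORT B =====
-- 0 = word char (alnum or '_'), 1 = whitespace, 2 = other
def kindOf (c : Char) : Nat :=
  if PySem.Chars.isalnum c || c == '_' then 0
  else if PySem.Chars.isspace c then 1 else 2

-- while j < n and _kind(line[j]) == k: j += 1
def pvRunEnd (cs : List Char) (k : Nat) (j : Nat) : Nat :=
  if h : j < cs.length ∧ kindOf (cs.getD j ' ') = k then pvRunEnd cs k (j + 1) else j
termination_by cs.length - j
decreasing_by omega

theorem pvRunEnd_ge (cs : List Char) (k j : Nat) : j ≤ pvRunEnd cs k j := by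
  unfold pvRunEnd
  split
  · have := pvRunEnd_ge cs k (j + 1); omega
  · exact Nat.le_refl j
termination_by cs.length - j
decreasing_by omega

-- the tokenizing loop: maximal runs (kind, start, end) covering positions [i, n)
def pvRuns (cs : List Char) (i : Nat) : List (Nat × Nat × Nat) :=
  if h : i < cs.length then
    let j := pvRunEnd cs (kindOf (cs.getD i ' ')) (i + 1)
    (kindOf (cs.getD i ' '), i, j) :: pvRuns cs j
  else []
termination_by cs.length - i
decreasing_by have := pvRunEnd_ge cs (kindOf (cs.getD i ' ')) (i + 1); omega

-- while rest and rest[0][2] <= idx: prev2, prev, rest = prev, rest[0], rest[1:]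
def pvWalkCover (idx : Nat) (p2 p : Option (Nat × Nat × Nat)) (l : List (Nat × Nat × Nat)) :
    Option (Nat × Nat × Nat) × Option (Nat × Nat × Nat) × List (Nat × Nat × Nat) :=
  match l with
  | [] => (p2, p, [])
  | run :: rest => if run.2.2 ≤ idx then pvWalkCover idx p (some run) rest else (p2, p, run :: rest)

-- while rest and rest[0][0] != 0: prev, rest = rest[0], rest[1:]
def pvWalkWord (p : Nat × Nat × Nat) (l : List (Nat × Nat × Nat)) :
    (Nat × Nat × Nat) × List (Nat × Nat × Nat) :=
  match l with
  | [] => (p, [])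
  | run :: rest => if run.1 ≠ 0 then pvWalkWord run rest else (p, run :: rest)

def word_range_alt (line : String) (cursor_col : Int) (scope : String) : Option (Int × Int) :=
  let cs := line.toList
  let n := cs.length
  if n = 0 ∨ cursor_col < 0 then none else
  let idx : Nat := min cursor_col.toNat (n - 1)
  let runs := pvRuns cs 0
  match pvWalkCover idx none none runs with
  | (p2, p, rest) =>
    let sel : Option ((Nat × Nat × Nat) × Option (Nat × Nat × Nat) × List (Nat × Nat × Nat)) :=
      match rest with
      | [] => none   -- unreachable: idx < n, the runs cover [0, n)
      | cur :: rest' =>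
        if cur.1 = 0 then some (cur, p, rest')
        else if decide (cur.2.1 = idx) && (match p with | some q => decide (q.1 = 0) | none => false) then
          some (p.getD (0, 0, 0), p2, cur :: rest')
        else
          match pvWalkWord cur rest' with
          | (_, []) => none
          | (pr, t :: rest''') => some (t, some pr, rest''')
    match sel with
    | none => none
    | some (t, left, right) =>
      let s := t.2.1
      let e := t.2.2
      if scope == "a" then
        let s := match left with | some q => if q.1 = 1 then q.2.1 else s | none => s
        let e := match right with | r :: _ => if r.1 = 1 then r.2.2 else e | [] => e
        some ((s : Int), (e : Int))
      else
        some ((s : Int), (e : Int))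

-- ===== PRECONDITION & SPEC =====
def Spec_word_range (line : String) (cursor_col : Int) (scope : String) (out : Option (Int × Int)) : Prop := out = word_range_alt line cursor_col scope
instance (line : String) (cursor_col : Int) (scope : String) (out : Option (Int × Int)) : Decidable (Spec_word_range line cursor_col scope out) := by unfold Spec_word_range; infer_instance

-- ===== CLAIM (what is proved, stated in full; the proofs are below) =====
def Claim_equal_word_range : Prop := ∀ (line : String) (cursor_col : Int) (scope : String), Dom_word_range line cursor_col scope → Spec_word_range line cursor_col scope (word_range line cursor_col scope)

-- ===== LEMMAS AND PROOFS =====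

-- a maximal run: nonempty, in range, constant kind, different kind on both sides
def GoodRun (cs : List Char) (t : Nat × Nat × Nat) : Prop :=
  t.2.1 < t.2.2 ∧ t.2.2 ≤ cs.length ∧
  (∀ j, t.2.1 ≤ j → j < t.2.2 → kindOf (cs.getD j ' ') = t.1) ∧
  (t.2.2 < cs.length → kindOf (cs.getD t.2.2 ' ') ≠ t.1) ∧
  (0 < t.2.1 → kindOf (cs.getD (t.2.1 - 1) ' ') ≠ t.1)

-- l is the run decomposition of positions [i, n)
def SF (cs : List Char) : Nat → List (Nat × Nat × Nat) → Prop
  | i, [] => cs.length ≤ i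
  | i, t :: rest => t.2.1 = i ∧ GoodRun cs t ∧ SF cs t.2.2 rest

def PrevOK (cs : List Char) (p : Option (Nat × Nat × Nat)) (i : Nat) : Prop :=
  match p with
  | none => i = 0
  | some q => GoodRun cs q ∧ q.2.2 = i

def PrevCtx (cs : List Char) (p2 p : Option (Nat × Nat × Nat)) (i : Nat) : Prop :=
  PrevOK cs p i ∧ (match p with | none => p2 = none | some q => PrevOK cs p2 q.2.1)

theorem word_not_space (c : Char) (h : isWordChar c = true) : PySem.Chars.isspace c = false := by
  simp only [isWordChar, PySem.Chars.isalnum, PySem.Chars.isalpha, PySem.Chars.isdigit,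
    PySem.Chars.isupper, PySem.Chars.islower, Char.le_def, Char.ext_iff,
    UInt32.le_iff_toNat_le, UInt32.ext_iff, Bool.or_eq_true, decide_eq_true_eq,
    Bool.and_eq_true, beq_iff_eq] at h
  simp only [PySem.Chars.isspace, Char.toNat]
  simp only [show ('0':Char).val.toNat = 48 from rfl, show ('9':Char).val.toNat = 57 from rfl,
    show ('A':Char).val.toNat = 65 from rfl, show ('Z':Char).val.toNat = 90 from rfl,
    show ('a':Char).val.toNat = 97 from rfl, show ('z':Char).val.toNat = 122 from rfl,
    show ('_':Char).val.toNat = 95 from rfl] at h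
  rcases h with ((h|h)|h)|h <;>
    (simp only [Bool.or_eq_false_iff, Bool.and_eq_false_iff, decide_eq_false_iff_not]; omega)

theorem kind0_iff (c : Char) : kindOf c = 0 ↔ isWordChar c = true := by
  simp only [kindOf, isWordChar]
  split_ifs <;> simp_all

theorem space_iff_kind1 (c : Char) : PySem.Chars.isspace c = true ↔ kindOf c = 1 := by
  simp only [kindOf]
  split_ifs with h1 h2
  · simp [word_not_space c (by simp [isWordChar, h1])]
  · simp [h2]
  · simp [h2]

theorem pvScan_eq_of (p : Char → Bool) (cs : List Char) (r r' : Nat)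
    (h1 : r ≤ r') (h2 : r' ≤ cs.length)
    (hall : ∀ j, r ≤ j → j < r' → p (cs.getD j ' ') = true)
    (hstop : r' < cs.length → p (cs.getD r' ' ') = false) :
    pvScan p cs r = r' := by
  rw [pvScan]
  rcases eq_or_lt_of_le h1 with rfl | hlt
  · rw [dif_neg]
    rintro ⟨hr, hp⟩
    rw [hstop hr] at hp
    cases hp
  · rw [dif_pos ⟨lt_of_lt_of_le hlt h2, hall r le_rfl hlt⟩]
    exact pvScan_eq_of p cs (r + 1) r' hlt h2 (fun j hj1 hj2 => hall j (by omega) hj2) hstop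
termination_by r' - r
decreasing_by omega

theorem pvScanBack_eq_of (p : Char → Bool) (cs : List Char) (s s' : Nat)
    (h1 : s' ≤ s)
    (hall : ∀ j, s' ≤ j → j < s → p (cs.getD j ' ') = true)
    (hstop : 0 < s' → p (cs.getD (s' - 1) ' ') = false) :
    pvScanBack p cs s = s' := by
  rw [pvScanBack]
  rcases eq_or_lt_of_le h1 with rfl | hlt
  · rw [dif_neg]
    rintro ⟨hs, hp⟩
    rw [hstop hs] at hp
    cases hp
  · rw [dif_pos ⟨by omega, hall (s - 1) (by omega) (by omega)⟩]
    exact pvScanBack_eq_of p cs (s - 1) s' (by omega) (fun j hj1 hj2 => hall j hj1 (by omega)) hstop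
termination_by s - s'
decreasing_by omega

theorem pvRunEnd_spec (cs : List Char) (k : Nat) (j : Nat) (hj : j ≤ cs.length) :
    pvRunEnd cs k j ≤ cs.length ∧
    (∀ j', j ≤ j' → j' < pvRunEnd cs k j → kindOf (cs.getD j' ' ') = k) ∧
    (pvRunEnd cs k j < cs.length → kindOf (cs.getD (pvRunEnd cs k j) ' ') ≠ k) := by
  rw [pvRunEnd]
  by_cases hcond : j < cs.length ∧ kindOf (cs.getD j ' ') = k
  · rw [dif_pos hcond]
    obtain ⟨ih1, ih2, ih3⟩ := pvRunEnd_spec cs k (j + 1) hcond.1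
    refine ⟨ih1, ?_, ih3⟩
    intro j' h1 h2
    rcases eq_or_lt_of_le h1 with rfl | hlt
    · exact hcond.2
    · exact ih2 j' hlt h2
  · rw [dif_neg hcond]
    refine ⟨hj, fun j' h1 h2 => by omega, fun h hk => hcond ⟨h, hk⟩⟩
termination_by cs.length - j
decreasing_by omega

theorem pvRuns_SF (cs : List Char) (i : Nat) (hi : i ≤ cs.length)
    (hmax : 0 < i → i < cs.length → kindOf (cs.getD i ' ') ≠ kindOf (cs.getD (i - 1) ' ')) :
    SF cs i (pvRuns cs i) := by
  rw [pvRuns]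
  by_cases h : i < cs.length
  · rw [dif_pos h]
    obtain ⟨s1, s2, s3⟩ := pvRunEnd_spec cs (kindOf (cs.getD i ' ')) (i + 1) (by omega)
    have hge := pvRunEnd_ge cs (kindOf (cs.getD i ' ')) (i + 1)
    refine ⟨rfl, ⟨by simpa using Nat.lt_of_lt_of_le (Nat.lt_succ_self i) hge, by simpa using s1, ?_, by simpa using s3, ?_⟩, ?_⟩
    · simp only []
      intro j' h1 h2
      rcases eq_or_lt_of_le h1 with rfl | hlt
      · rfl
      · exact s2 j' hlt h2
    · simpa using fun h0 => Ne.symm (hmax h0 h)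
    · apply pvRuns_SF cs _ s1
      intro h1 h2
      have hk : kindOf (cs.getD (pvRunEnd cs (kindOf (cs.getD i ' ')) (i + 1) - 1) ' ')
          = kindOf (cs.getD i ' ') := by
        rcases eq_or_lt_of_le hge with heq | hlt
        · rw [← heq]; simp
        · exact s2 _ (by omega) (by omega)
      rw [hk]
      exact s3 h2
  · rw [dif_neg h]
    simp only [SF]
    omega
termination_by cs.length - i
decreasing_by have := pvRunEnd_ge cs (kindOf (cs.getD i ' ')) (i + 1); omega

theorem walkCover_spec (cs : List Char) (idx : Nat) :
    ∀ (l : List (Nat × Nat × Nat)) (p2 p : Option (Nat × Nat × Nat)) (i : Nat),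
    SF cs i l → PrevCtx cs p2 p i → i ≤ idx →
    ∃ q2 q l' m, pvWalkCover idx p2 p l = (q2, q, l') ∧
      SF cs m l' ∧ PrevCtx cs q2 q m ∧ m ≤ idx ∧
      (∀ hd tl, l' = hd :: tl → idx < hd.2.2) := by
  intro l
  induction l with
  | nil =>
    intro p2 p i hsf hctx hi
    exact ⟨p2, p, [], i, rfl, hsf, hctx, hi, fun hd tl h => by cases h⟩
  | cons run rest ih =>
    intro p2 p i hsf hctx hi
    obtain ⟨hstart, hgood, hsf'⟩ := hsf
    by_cases hle : run.2.2 ≤ idx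
    · rw [pvWalkCover, if_pos hle]
      apply ih p (some run) run.2.2 hsf'
      · exact ⟨⟨hgood, rfl⟩, by show PrevOK cs p run.2.1; rw [hstart]; exact hctx.1⟩
      · exact hle
    · rw [pvWalkCover, if_neg hle]
      exact ⟨p2, p, run :: rest, i, rfl, ⟨hstart, hgood, hsf'⟩, hctx, hi,
        fun hd tl h => by cases h; omega⟩

theorem walkWord_spec (cs : List Char) :
    ∀ (l : List (Nat × Nat × Nat)) (p : Nat × Nat × Nat) (i : Nat),
    SF cs i l → GoodRun cs p → p.2.2 = i → p.1 ≠ 0 →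
    ∃ q l' m, pvWalkWord p l = (q, l') ∧
      SF cs m l' ∧ GoodRun cs q ∧ q.2.2 = m ∧ q.1 ≠ 0 ∧ i ≤ m ∧
      (∀ j, i ≤ j → j < m → kindOf (cs.getD j ' ') ≠ 0) ∧
      (∀ hd tl, l' = hd :: tl → hd.1 = 0) := by
  intro l
  induction l with
  | nil =>
    intro p i hsf hgood he hk
    exact ⟨p, [], i, rfl, hsf, hgood, he, hk, le_rfl, fun j h1 h2 => by omega,
      fun hd tl h => by cases h⟩
  | cons run rest ih =>
    intro p i hsf hgood he hk
    obtain ⟨hstart, hgoodr, hsf'⟩ := hsf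
    by_cases h0 : run.1 = 0
    · rw [pvWalkWord, if_neg (by simpa using h0)]
      exact ⟨p, run :: rest, i, rfl, ⟨hstart, hgoodr, hsf'⟩, hgood, he, hk, le_rfl,
        fun j h1 h2 => by omega, fun hd tl h => by cases h; exact h0⟩
    · rw [pvWalkWord, if_pos (by simpa using h0)]
      obtain ⟨q, l', m, heq, hsfm, hgq, hqe, hqk, him, hnw, hhd⟩ :=
        ih run run.2.2 hsf' hgoodr rfl h0
      refine ⟨q, l', m, heq, hsfm, hgq, hqe, hqk, by have := hgoodr.1; omega, ?_, hhd⟩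
      intro j h1 h2
      by_cases hj : j < run.2.2
      · have := hgoodr.2.2.1 j (by omega) hj
        rw [this]
        exact h0
      · exact hnw j (by omega) h2

theorem scanBack_space (cs : List Char) (q : Option (Nat × Nat × Nat)) (s : Nat)
    (h : PrevOK cs q s) :
    pvScanBack (fun c => PySem.Chars.isspace c) cs s =
      (match q with | some q' => if q'.1 = 1 then q'.2.1 else s | none => s) := by
  match q with
  | none =>
    obtain rfl : s = 0 := h
    exact pvScanBack_eq_of _ cs 0 0 le_rfl (fun j h1 h2 => by omega) (fun h => by omega)
  | some q' =>
    obtain ⟨hgood, hend⟩ := h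
    by_cases hk : q'.1 = 1
    · simp only [hk]
      apply pvScanBack_eq_of _ cs s q'.2.1 (by have := hgood.1; omega)
      · intro j h1 h2
        rw [(space_iff_kind1 _).2]
        rw [hgood.2.2.1 j h1 (by omega)]
        exact hk
      · intro h0
        have hne := hgood.2.2.2.2 h0
        rw [hk] at hne
        rw [← Bool.not_eq_true]
        intro hsp
        exact hne ((space_iff_kind1 _).1 hsp)
    · simp only [if_neg hk]
      apply pvScanBack_eq_of _ cs s s le_rfl (fun j h1 h2 => by omega)
      intro h0
      have hkind := hgood.2.2.1 (s - 1) (by have := hgood.1; omega) (by have := hgood.1; omega)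
      rw [← Bool.not_eq_true]
      intro hsp
      exact hk (by rw [← hkind]; exact (space_iff_kind1 _).1 hsp)

theorem scan_space (cs : List Char) (l : List (Nat × Nat × Nat)) (e : Nat)
    (h : SF cs e l) (he : e ≤ cs.length) :
    pvScan (fun c => PySem.Chars.isspace c) cs e =
      (match l with | r :: _ => if r.1 = 1 then r.2.2 else e | [] => e) := by
  match l with
  | [] =>
    exact pvScan_eq_of _ cs e e le_rfl he (fun j h1 h2 => by omega) (fun h0 => by
      have : cs.length ≤ e := h
      omega)
  | r :: rest =>
    obtain ⟨hstart, hgood, hsf'⟩ := h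
    by_cases hk : r.1 = 1
    · simp only [hk]
      apply pvScan_eq_of _ cs e r.2.2 (by have := hgood.1; omega) hgood.2.1
      · intro j h1 h2
        rw [(space_iff_kind1 _).2]
        rw [hgood.2.2.1 j (by omega) h2]
        exact hk
      · intro h0
        have hne := hgood.2.2.2.1 h0
        rw [hk] at hne
        rw [← Bool.not_eq_true]
        intro hsp
        exact hne ((space_iff_kind1 _).1 hsp)
    · simp only [if_neg hk]
      apply pvScan_eq_of _ cs e e le_rfl he (fun j h1 h2 => by omega)
      intro h0
      have hkind := hgood.2.2.1 e (by omega) (by have := hgood.1; omega)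
      rw [← Bool.not_eq_true]
      intro hsp
      exact hk (by rw [← hkind]; exact (space_iff_kind1 _).1 hsp)

-- ===== VERDICT (by name: the statement is the Claim_ definition above) =====
theorem word_range_spec : Claim_equal_word_range := by
  intro line cursor_col scope _
  unfold Spec_word_range
  obtain ⟨cs, hcs⟩ : ∃ cs, line.toList = cs := ⟨_, rfl⟩
  by_cases hn : cs.length = 0
  · simp [word_range, word_range_alt, hcs, hn]
  by_cases hneg : cursor_col < 0
  · have h1 : ¬ (cursor_col ≥ (cs.length : Int)) := by omega
    simp [word_range, word_range_alt, hcs, hn, hneg, h1]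
  -- main case
  have hnpos : 0 < cs.length := Nat.pos_of_ne_zero hn
  rw [word_range, word_range_alt]
  simp only [hcs]
  rw [if_neg hn, if_neg (by omega : ¬ (cs.length = 0 ∨ cursor_col < 0))]
  set idx := min cursor_col.toNat (cs.length - 1) with hidx
  have hidxlt : idx < cs.length := by omega
  have hAidx : (if cursor_col ≥ (cs.length : Int) then ((cs.length : Int) - 1) else cursor_col)
      = (idx : Int) := by
    split_ifs with h <;> omega
  rw [hAidx, if_neg (by omega : ¬ ((idx : Int) < 0))]
  simp only [Int.toNat_natCast]
  -- run decomposition and the covering walk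
  have hSF : SF cs 0 (pvRuns cs 0) :=
    pvRuns_SF cs 0 (by omega) (fun h => absurd h (lt_irrefl 0))
  obtain ⟨q2, q, l', m, hCeq, hSF', hctx, hm, hhead⟩ :=
    walkCover_spec cs idx (pvRuns cs 0) none none 0 hSF ⟨rfl, rfl⟩ (by omega)
  rw [hCeq]
  cases l' with
  | nil =>
    have : cs.length ≤ m := hSF'
    omega
  | cons cur rest' =>
    obtain ⟨hcstart, hcgood, hcrest⟩ := hSF'
    have hcov : idx < cur.2.2 := hhead cur rest' rfl
    have hcle : cur.2.1 ≤ idx := by omega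
    have hkindidx : kindOf (cs.getD idx ' ') = cur.1 := hcgood.2.2.1 idx (by omega) hcov
    by_cases hk0 : cur.1 = 0
    · -- cursor already on a word run
      have hw : isWordChar (cs.getD idx ' ') = true := (kind0_iff _).1 (hkindidx.trans hk0)
      have hsB : pvScanBack isWordChar cs idx = cur.2.1 := by
        apply pvScanBack_eq_of _ cs idx cur.2.1 hcle
        · intro j h1 h2
          exact (kind0_iff _).1 ((hcgood.2.2.1 j h1 (by omega)).trans hk0)
        · intro h0
          rw [← Bool.not_eq_true]
          exact fun hwj => hcgood.2.2.2.2 h0 (by rw [hk0]; exact (kind0_iff _).2 hwj)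
      have heB : pvScan isWordChar cs idx = cur.2.2 := by
        apply pvScan_eq_of _ cs idx cur.2.2 (by omega) hcgood.2.1
        · intro j h1 h2
          exact (kind0_iff _).1 ((hcgood.2.2.1 j (by omega) h2).trans hk0)
        · intro h0
          rw [← Bool.not_eq_true]
          exact fun hwj => hcgood.2.2.2.1 h0 (by rw [hk0]; exact (kind0_iff _).2 hwj)
      simp only [hw, Bool.not_true, Bool.false_and, Bool.false_eq_true, if_false, hk0, if_true,
        hsB, heB]
      cases hsc : scope == "a" with
      | false => simp only [Bool.false_eq_true, if_false]
      | true =>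
        simp only [if_true]
        rw [scanBack_space cs q cur.2.1 (by rw [hcstart]; exact hctx.1),
          scan_space cs rest' cur.2.2 hcrest hcgood.2.1]
        cases q <;> cases rest' <;> simp
    · -- cursor on a non-word run
      have hwf : isWordChar (cs.getD idx ' ') = false := by
        rw [← Bool.not_eq_true]
        exact fun hwj => hk0 (hkindidx.symm.trans ((kind0_iff _).2 hwj))
      by_cases hbs : cur.2.1 = idx ∧ ∃ qr, q = some qr ∧ qr.1 = 0
      · -- back-step onto the preceding word run
        obtain ⟨hcuridx, qr, hq, hqr0⟩ := hbs
        have hqok : GoodRun cs qr ∧ qr.2.2 = m := by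
          have h1 := hctx.1
          rw [hq] at h1
          exact h1
        have hqlt : qr.2.1 < qr.2.2 := hqok.1.1
        have hqe : qr.2.2 = idx := by omega
        have hidxpos : 0 < idx := by omega
        have hwprev : isWordChar (cs.getD (idx - 1) ' ') = true :=
          (kind0_iff _).1 ((hqok.1.2.2.1 (idx - 1) (by omega) (by omega)).trans hqr0)
        have hsB : pvScanBack isWordChar cs (idx - 1) = qr.2.1 := by
          apply pvScanBack_eq_of _ cs (idx - 1) qr.2.1 (by omega)
          · intro j h1 h2
            exact (kind0_iff _).1 ((hqok.1.2.2.1 j h1 (by omega)).trans hqr0)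
          · intro h0
            rw [← Bool.not_eq_true]
            exact fun hwj => hqok.1.2.2.2.2 h0 (by rw [hqr0]; exact (kind0_iff _).2 hwj)
        have heB : pvScan isWordChar cs (idx - 1) = qr.2.2 := by
          apply pvScan_eq_of _ cs (idx - 1) qr.2.2 (by omega) (by omega)
          · intro j h1 h2
            have hj : j = idx - 1 := by omega
            rw [hj]
            exact hwprev
          · intro h0
            rw [← Bool.not_eq_true]
            intro hwj
            apply hk0
            rw [← hkindidx]
            rw [show cs.getD qr.2.2 ' ' = cs.getD idx ' ' from by rw [hqe]] at hwj
            exact (kind0_iff _).2 hwj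
        have hcond : (!isWordChar (cs.getD idx ' ') && decide (0 < idx) &&
            isWordChar (cs.getD (idx - 1) ' ')) = true := by
          rw [hwf, hwprev]
          simp [hidxpos]
        have hSFq : SF cs qr.2.2 (cur :: rest') := by
          show cur.2.1 = qr.2.2 ∧ GoodRun cs cur ∧ SF cs cur.2.2 rest'
          exact ⟨by omega, hcgood, hcrest⟩
        have hPrev2 : PrevOK cs q2 qr.2.1 := by
          have h2 := hctx.2
          rw [hq] at h2
          exact h2
        simp only [hwf, hwprev, hidxpos, hsB, heB, hq, Option.getD_some, Bool.not_false,
          Bool.not_true, Bool.and_true, decide_true, if_true,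
          Bool.false_eq_true, if_false, decide_eq_true_eq, Bool.and_eq_true]
        rw [if_neg hk0, if_pos (⟨hcuridx, hqr0⟩ : cur.2.1 = idx ∧ qr.1 = 0)]
        cases hsc : scope == "a" with
        | false => simp
        | true =>
          simp only [if_true]
          rw [scanBack_space cs q2 qr.2.1 hPrev2, scan_space cs (cur :: rest') qr.2.2 hSFq (by omega)]
          cases q2 <;> simp
      · -- no back-step: scan right for the next word run
        have hnbs : ¬(0 < idx ∧ isWordChar (cs.getD (idx - 1) ' ') = true) := by
          rintro ⟨hpos, hwp⟩
          apply hbs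
          have hk1 : kindOf (cs.getD (idx - 1) ' ') = 0 := (kind0_iff _).2 hwp
          have hc1 : cur.2.1 = idx := by
            by_contra hne
            have := hcgood.2.2.1 (idx - 1) (by omega) (by omega)
            rw [hk1] at this
            exact hk0 this.symm
          refine ⟨hc1, ?_⟩
          have hm' : m = idx := by omega
          have h1 := hctx.1
          rcases hqq : q with - | qr
          · rw [hqq] at h1
            have h0 : m = 0 := h1
            omega
          · rw [hqq] at h1
            refine ⟨qr, rfl, ?_⟩
            have hcover := h1.1.2.2.1 (idx - 1) (by have := h1.1.1; have := h1.2; omega)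
              (by have := h1.2; omega)
            rw [hk1] at hcover
            exact hcover.symm
        have hword1 : isWordChar (cs.getD (idx - 1) ' ') = false := by
          by_cases hp : 0 < idx
          · rw [← Bool.not_eq_true]
            exact fun hwp => hnbs ⟨hp, hwp⟩
          · rw [show idx - 1 = idx from by omega]
            exact hwf
        obtain ⟨q', l'', m', hWeq, hsfm', hgq', hqe', hqk', him', hnw', hhd'⟩ :=
          walkWord_spec cs rest' cur cur.2.2 hcrest hcgood rfl hk0
        simp only [hwf, Bool.not_false, Bool.true_and, hword1, Bool.and_false,
          Bool.false_eq_true, if_false, if_true]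
        rw [if_neg hk0]
        cases l'' with
        | nil =>
          have hlen : cs.length ≤ m' := hsfm'
          have hm'le : m' ≤ cs.length := by
            have := hgq'.2.1
            omega
          have hscan : pvScan (fun c => !isWordChar c) cs idx = cs.length := by
            apply pvScan_eq_of _ cs idx cs.length (by omega) le_rfl
            · intro j h1 h2
              simp only [Bool.not_eq_true']
              rw [← Bool.not_eq_true]
              intro hwj
              by_cases hj : j < cur.2.2
              · exact hk0 ((hcgood.2.2.1 j (by omega) hj).symm.trans ((kind0_iff _).2 hwj))
              · exact hnw' j (by omega) (by omega) ((kind0_iff _).2 hwj)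
            · intro h
              omega
          rw [hscan, if_pos le_rfl, hWeq]
          rcases hq : q with - | qr
          · simp
          · by_cases h1 : cur.2.1 = idx
            · have hd2 : decide (qr.1 = 0) = false :=
                decide_eq_false fun h2 => hbs ⟨h1, qr, hq, h2⟩
              simp [hd2]
            · have hd1 : decide (cur.2.1 = idx) = false := decide_eq_false h1
              simp [hd1]
        | cons t rest3 =>
          obtain ⟨htstart, htgood, htrest⟩ := hsfm'
          have ht0 : t.1 = 0 := hhd' t rest3 rfl
          have htlt : t.2.1 < t.2.2 := htgood.1
          have htle : t.2.2 ≤ cs.length := htgood.2.1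
          have hscan : pvScan (fun c => !isWordChar c) cs idx = m' := by
            apply pvScan_eq_of _ cs idx m' (by omega) (by omega)
            · intro j h1 h2
              simp only [Bool.not_eq_true']
              rw [← Bool.not_eq_true]
              intro hwj
              by_cases hj : j < cur.2.2
              · exact hk0 ((hcgood.2.2.1 j (by omega) hj).symm.trans ((kind0_iff _).2 hwj))
              · exact hnw' j (by omega) h2 ((kind0_iff _).2 hwj)
            · intro h
              simp only [Bool.not_eq_false']
              exact (kind0_iff _).1 ((htgood.2.2.1 m' (by omega) (by omega)).trans ht0)
          have hsB : pvScanBack isWordChar cs m' = m' := by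
            apply pvScanBack_eq_of _ cs m' m' le_rfl (fun j h1 h2 => by omega)
            intro h0
            rw [← Bool.not_eq_true]
            intro hwj
            apply htgood.2.2.2.2 (by omega)
            rw [ht0, htstart]
            exact (kind0_iff _).2 hwj
          have heB : pvScan isWordChar cs m' = t.2.2 := by
            apply pvScan_eq_of _ cs m' t.2.2 (by omega) htle
            · intro j h1 h2
              exact (kind0_iff _).1 ((htgood.2.2.1 j (by omega) h2).trans ht0)
            · intro h0
              rw [← Bool.not_eq_true]
              exact fun hwj => htgood.2.2.2.1 h0 (by rw [ht0]; exact (kind0_iff _).2 hwj)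
          rw [hscan, if_neg (by omega : ¬ cs.length ≤ m'), hWeq]
          simp only [hsB, heB]
          rcases hq : q with - | qr
          · simp only [Bool.and_false, Bool.false_eq_true, if_false]
            cases hsc : scope == "a" with
            | false => simp [htstart]
            | true =>
              simp only [if_true]
              rw [scanBack_space cs (some q') m' ⟨hgq', hqe'⟩,
                scan_space cs rest3 t.2.2 htrest htle]
              simp only [htstart]
              cases rest3 <;> simp
          · by_cases h1 : cur.2.1 = idx
            · have hd2 : decide (qr.1 = 0) = false :=
                decide_eq_false fun h2 => hbs ⟨h1, qr, hq, h2⟩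
              simp only [hd2, Bool.and_false, Bool.false_eq_true, if_false]
              cases hsc : scope == "a" with
              | false => simp [htstart]
              | true =>
                simp only [if_true]
                rw [scanBack_space cs (some q') m' ⟨hgq', hqe'⟩,
                  scan_space cs rest3 t.2.2 htrest htle]
                simp only [htstart]
                cases rest3 <;> simp
            · have hd1 : decide (cur.2.1 = idx) = false := decide_eq_false h1
              simp only [hd1, Bool.false_and, Bool.false_eq_true, if_false]
              cases hsc : scope == "a" with
              | false => simp [htstart]
              | true =>
                simp only [if_true]
                rw [scanBack_space cs (some q') m' ⟨hgq', hqe'⟩,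
                  scan_space cs rest3 t.2.2 htrest htle]
                simp only [htstart]
                cases rest3 <;> simp
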